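-- pv_equiv track=rewrite | github.com/Kandy44/advent-of-code | 2015/day_17/day_17.py | part_2
-- ===== SOURCE A (Python) =====
-- from itertools import combinations
--
-- def part_2(containers, req_liters):
--     comb_length_counts = {}
--     for i in range(1, len(containers)):
--         comb_length_counts[i] = 0
--         for comb in combinations(containers, r=i):
--             if sum(comb) == req_liters:
--                 comb_length_counts[i] += 1
--
--     min_length_container_combinations = next(
--         (
--             comb_length_counts[i]
--             for i in sorted(comb_length_counts)
--             if comb_length_counts[i] > 0
--         ),
--         0,
--     )
--     return min_length_container_combinations
-- ===== SOURCE B (Python) =====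
-- def part_2(containers, req_liters):
--     # DP: rows[k] maps a sum to the number of size-k sub-multisets with that sum.
--     n = len(containers)
--     rows = [{0: 1}] + [{} for _ in range(n)]
--     for c in containers:
--         new_rows = [rows[0]]
--         for prev, cur in zip(rows, rows[1:]):
--             merged = dict(cur)
--             for s, cnt in prev.items():
--                 merged[s + c] = merged.get(s + c, 0) + cnt
--             new_rows.append(merged)
--         rows = new_rows
--     for row in rows[1:n]:
--         v = row.get(req_liters, 0)
--         if v > 0:
--             return v
--     return 0
-- ===== Notes on version B (the rewrite author's own statement) =====
-- stated objective: alternative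
-- what changed: Replaces A's enumeration of every combination of every size 1..n-1 (itertools.combinations, each summed) with a subset-sum counting DP whose rows map size k to {sum: count}, then reads off the first size 1..n-1 with a positive count for the target sum; much faster on small/duplicate-heavy values but not confirmed faster on arbitrary 32-bit values, where the number of distinct sums itself grows exponentially.
import Mathlib
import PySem

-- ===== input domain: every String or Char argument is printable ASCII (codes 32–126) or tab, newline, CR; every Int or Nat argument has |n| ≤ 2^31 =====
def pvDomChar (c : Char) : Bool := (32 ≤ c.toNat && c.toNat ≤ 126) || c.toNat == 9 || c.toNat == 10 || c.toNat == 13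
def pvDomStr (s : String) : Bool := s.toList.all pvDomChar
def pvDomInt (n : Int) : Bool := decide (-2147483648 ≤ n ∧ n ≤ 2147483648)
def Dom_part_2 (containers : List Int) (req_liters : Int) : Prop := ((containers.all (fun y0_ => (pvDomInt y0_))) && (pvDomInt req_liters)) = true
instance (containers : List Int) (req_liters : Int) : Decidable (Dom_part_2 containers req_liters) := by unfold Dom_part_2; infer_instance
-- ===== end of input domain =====

-- B replaces A's exponential enumeration of combinations of every size by a subset-sum counting
-- DP over (size, sum); return value only — neither version mutates its arguments.

-- ===== PORT A =====
-- itertools.combinations(containers, r), in Python's emission order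
def pyCombinations : List Int → Nat → List (List Int)
  | _, 0 => [[]]
  | [], _ + 1 => []
  | x :: xs, k + 1 => ((pyCombinations xs k).map (fun c => x :: c)) ++ pyCombinations xs (k + 1)

-- the comb_length_counts dict built by A's two nested loops
def part2Dict (containers : List Int) (req_liters : Int) : PySem.Dict Int Int :=
  (PySem.List.pyRange 1 (containers.length : Int) 1).foldl
    (fun d i =>
      (pyCombinations containers i.toNat).foldl
        (fun d comb => if comb.sum == req_liters then d.insert i (d.getD i 0 + 1) else d)
        (d.insert i 0))
    PySem.Dict.empty

def part_2 (containers : List Int) (req_liters : Int) : Int :=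
  let comb_length_counts := part2Dict containers req_liters
  -- next((comb_length_counts[i] for i in sorted(comb_length_counts) if comb_length_counts[i] > 0), 0)
  match (PySem.List.sorted comb_length_counts.keys (fun x => x) false).find?
      (fun i => decide (0 < comb_length_counts.getD i 0)) with
  | some i => comb_length_counts.getD i 0
  | none => 0

-- ===== PORT B =====
-- merged = dict(cur); for s, cnt in prev.items(): merged[s + c] = merged.get(s + c, 0) + cnt
def mergeRow (c : Int) (prev cur : PySem.Dict Int Int) : PySem.Dict Int Int :=
  prev.items.foldl (fun m p => m.insert (p.1 + c) (m.getD (p.1 + c) 0 + p.2)) cur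

-- new_rows = [rows[0]] + [merged for prev, cur in zip(rows, rows[1:])]
def stepRows (c : Int) (rows : List (PySem.Dict Int Int)) : List (PySem.Dict Int Int) :=
  match rows with
  | [] => []
  | r0 :: rest => r0 :: (List.zip (r0 :: rest) rest).map (fun p => mergeRow c p.1 p.2)

def part_2_alt (containers : List Int) (req_liters : Int) : Int :=
  let n := containers.length
  let rows := containers.foldl (fun rows c => stepRows c rows)
      ((PySem.Dict.empty.insert 0 1) :: List.replicate n PySem.Dict.empty)
  match (PySem.List.slice rows (some (1 : Int)) (some (n : Int))).find?
      (fun row => decide (0 < row.getD req_liters 0)) with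
  | some row => row.getD req_liters 0
  | none => 0

-- ===== PRECONDITION & SPEC =====
def Spec_part_2 (containers : List Int) (req_liters : Int) (out : Int) : Prop := out = part_2_alt containers req_liters
instance (containers : List Int) (req_liters : Int) (out : Int) : Decidable (Spec_part_2 containers req_liters out) := by unfold Spec_part_2; infer_instance

-- ===== CLAIM (what is proved, stated in full; the proofs are below) =====
def Claim_equal_part_2 : Prop := ∀ (containers : List Int) (req_liters : Int), Dom_part_2 containers req_liters → Spec_part_2 containers req_liters (part_2 containers req_liters)

-- ===== LEMMAS AND PROOFS =====

def cnt (k : Nat) (s : Int) (xs : List Int) : Nat :=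
  (pyCombinations xs k).countP (fun c => c.sum == s)
theorem pyCombinations_zero (xs : List Int) : pyCombinations xs 0 = [[]] := by
  cases xs <;> rfl
theorem cnt_zero (s : Int) (xs : List Int) : cnt 0 s xs = if s = 0 then 1 else 0 := by
  simp only [cnt, pyCombinations_zero, List.countP_cons, List.countP_nil, List.sum_nil]
  by_cases h : s = 0 <;> simp [h]
  omega
theorem cnt_nil (k : Nat) (s : Int) : cnt (k + 1) s [] = 0 := by
  simp [cnt, pyCombinations]
theorem cnt_cons_succ (k : Nat) (s x : Int) (t : List Int) :
    cnt (k + 1) s (x :: t) = cnt k (s - x) t + cnt (k + 1) s t := by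
  simp only [cnt, pyCombinations, List.countP_append, List.countP_map]
  congr 1
  apply List.countP_congr
  intro a _
  simp only [Function.comp, List.sum_cons, beq_iff_eq]
  constructor <;> (intro h; omega)
theorem cnt_snoc_succ (k : Nat) (s c : Int) (xs : List Int) :
    cnt (k + 1) s (xs ++ [c]) = cnt (k + 1) s xs + cnt k (s - c) xs := by
  induction xs generalizing k s with
  | nil =>
    rw [List.nil_append]
    have h := cnt_cons_succ k s c []
    omega
  | cons x t ih =>
    rw [List.cons_append, cnt_cons_succ, cnt_cons_succ, ih k s]
    cases k with
    | zero =>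
      simp only [cnt_zero]
      split_ifs <;> omega
    | succ k'' =>
      rw [ih k'' (s - x), cnt_cons_succ]
      have h : s - x - c = s - c - x := by ring
      rw [h]
      omega
theorem innerA_getD (req i : Int) (L : List (List Int)) (d : PySem.Dict Int Int) (j : Int) :
    (L.foldl (fun d comb => if comb.sum == req then d.insert i (d.getD i 0 + 1) else d) d).getD j 0
      = if j = i then d.getD i 0 + (L.countP (fun c => c.sum == req) : Int) else d.getD j 0 := by
  induction L generalizing d with
  | nil =>
    simp only [List.foldl_nil, List.countP_nil, Nat.cast_zero, add_zero]
    split_ifs with hj <;> simp [hj]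
  | cons a t ih =>
    simp only [List.foldl_cons, List.countP_cons]
    by_cases ha : (a.sum == req) = true
    · rw [if_pos ha, ih]
      by_cases hj : j = i
      · subst hj
        simp only [PySem.Dict.getD_insert_self, ha, if_true]
        push_cast
        ring
      · simp only [PySem.Dict.getD_insert, if_neg hj]
    · rw [if_neg ha, ih]
      simp [ha]
theorem innerA_keys (req i : Int) (L : List (List Int)) (d : PySem.Dict Int Int)
    (h : d.contains i = true) :
    (L.foldl (fun d comb => if comb.sum == req then d.insert i (d.getD i 0 + 1) else d) d).keys
      = d.keys := by
  induction L generalizing d with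
  | nil => rfl
  | cons a t ih =>
    simp only [List.foldl_cons]
    by_cases ha : (a.sum == req) = true
    · rw [if_pos ha, ih _ (by simp),
        PySem.Dict.keys_insert_of_contains]
      exact h
    · rw [if_neg ha, ih _ h]
def dictAux (containers : List Int) (req : Int) (M : Int) : PySem.Dict Int Int :=
  (PySem.List.pyRange 1 M 1).foldl
    (fun d i =>
      (pyCombinations containers i.toNat).foldl
        (fun d comb => if comb.sum == req then d.insert i (d.getD i 0 + 1) else d)
        (d.insert i 0))
    PySem.Dict.empty

theorem dictAux_succ (containers : List Int) (req : Int) (M : Int) (hM : 1 ≤ M) :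
    dictAux containers req (M + 1)
      = (pyCombinations containers M.toNat).foldl
          (fun d comb => if comb.sum == req then d.insert M (d.getD M 0 + 1) else d)
          ((dictAux containers req M).insert M 0) := by
  rw [dictAux, dictAux, PySem.List.pyRange_one_succ_right hM, List.foldl_append]
  rfl

theorem dictA_spec (containers : List Int) (req : Int) (M : Nat) :
    (dictAux containers req (M : Int)).keys = PySem.List.pyRange 1 (M : Int) 1 ∧
      ∀ j : Int, (dictAux containers req (M : Int)).getD j 0
        = if 1 ≤ j ∧ j < (M : Int) then (cnt j.toNat req containers : Int) else 0 := by
  induction M with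
  | zero =>
    rw [dictAux, PySem.List.pyRange_one_eq_nil (by omega)]
    exact ⟨rfl, fun j => by rw [if_neg (by omega)]; rfl⟩
  | succ M ih =>
    rcases Nat.eq_zero_or_pos M with hM | hM
    · subst hM
      rw [dictAux, PySem.List.pyRange_one_eq_nil (by omega)]
      exact ⟨rfl, fun j => by rw [if_neg (by omega)]; rfl⟩
    · have hM1 : (1 : Int) ≤ (M : Int) := by exact_mod_cast hM
      obtain ⟨ihk, ihg⟩ := ih
      have hcont : (dictAux containers req (M : Int)).contains (M : Int) = false := by
        rw [PySem.Dict.contains_eq_decide_mem_keys, ihk]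
        simp [PySem.List.mem_pyRange_one]
      have hstep : dictAux containers req ((M + 1 : Nat) : Int)
          = (pyCombinations containers ((M : Int)).toNat).foldl
              (fun d comb => if comb.sum == req then d.insert (M : Int) (d.getD (M : Int) 0 + 1) else d)
              ((dictAux containers req (M : Int)).insert (M : Int) 0) := by
        push_cast
        exact dictAux_succ containers req (M : Int) hM1
      constructor
      · rw [hstep, innerA_keys _ _ _ _ (PySem.Dict.contains_insert_self _ _ _),
          PySem.Dict.keys_insert_of_not_contains, ihk]
        · push_cast
          rw [PySem.List.pyRange_one_succ_right hM1]
        · exact hcont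
      · intro j
        rw [hstep, innerA_getD]
        by_cases hj : j = (M : Int)
        · subst hj
          rw [if_pos rfl, PySem.Dict.getD_insert_self]
          have : List.countP (fun c => c.sum == req) (pyCombinations containers ((M : Int)).toNat)
              = cnt ((M : Int)).toNat req containers := rfl
          rw [this, if_pos ⟨hM1, by push_cast; omega⟩, zero_add]
        · rw [if_neg hj, PySem.Dict.getD_insert, if_neg hj, ihg j]
          by_cases h1 : 1 ≤ j ∧ j < (M : Int)
          · rw [if_pos h1, if_pos (by push_cast; omega)]
          · rw [if_neg h1, if_neg (by push_cast; intro hc; rcases hc with ⟨hc1, hc2⟩; apply h1; constructor <;> omega)]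
theorem foldl_merge_getD (c t : Int) (L : List (Int × Int)) (m : PySem.Dict Int Int) :
    (L.foldl (fun m p => m.insert (p.1 + c) (m.getD (p.1 + c) 0 + p.2)) m).getD t 0
      = m.getD t 0 + ((L.filter (fun p => p.1 + c == t)).map Prod.snd).sum := by
  induction L generalizing m with
  | nil => simp
  | cons p r ih =>
    simp only [List.foldl_cons, List.filter_cons]
    by_cases hq : p.1 + c = t
    · rw [ih, if_pos (by simpa using hq)]
      simp only [List.map_cons, List.sum_cons, hq, PySem.Dict.getD_insert_self]
      ring
    · rw [ih, if_neg (by simpa using hq), PySem.Dict.getD_insert, if_neg (fun h => hq h.symm)]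
theorem getD_mk_cons (k v s : Int) (r : List (Int × Int)) :
    (PySem.Dict.mk ((k, v) :: r)).getD s 0 = if k == s then v else (PySem.Dict.mk r).getD s 0 := by
  rw [PySem.Dict.getD_eq_get?_getD, PySem.Dict.get?_mk_cons]
  by_cases hk : (k == s) = true
  · simp [hk]
  · simp only [Bool.not_eq_true] at hk
    simp [hk, PySem.Dict.getD_eq_get?_getD]
theorem filter_sum_aux (l : List (Int × Int)) (s : Int) (h : (l.map Prod.fst).Nodup) :
    ((l.filter (fun p => p.1 == s)).map Prod.snd).sum = (PySem.Dict.mk l).getD s 0 := by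
  induction l with
  | nil => rfl
  | cons p r ih =>
    obtain ⟨k, v⟩ := p
    simp only [List.map_cons, List.nodup_cons] at h
    simp only [List.filter_cons, getD_mk_cons]
    by_cases hp : k = s
    · rw [if_pos (by simpa using hp), if_pos (by simpa using hp)]
      have hrest : r.filter (fun q => q.1 == s) = [] := by
        rw [List.filter_eq_nil_iff]
        intro q hq hq'
        exact h.1 (by rw [hp, ← (by simpa using hq' : q.1 = s)]; exact List.mem_map_of_mem hq)
      rw [hrest]
      simp
    · rw [if_neg (by simpa using hp), if_neg (by simpa using hp), ih h.2]
theorem filter_sum_eq_getD (d : PySem.Dict Int Int) (s : Int) (h : d.keys.Nodup) :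
    ((d.items.filter (fun p => p.1 == s)).map Prod.snd).sum = d.getD s 0 := by
  obtain ⟨l⟩ := d
  exact filter_sum_aux l s h
theorem mergeRow_getD (c t : Int) (prev cur : PySem.Dict Int Int) (h : prev.keys.Nodup) :
    (mergeRow c prev cur).getD t 0 = cur.getD t 0 + prev.getD (t - c) 0 := by
  rw [mergeRow, foldl_merge_getD]
  congr 1
  rw [List.filter_congr (fun a _ => show ((a.1 + c == t)) = (a.1 == t - c) by
    by_cases h : a.1 + c = t
    · rw [(by simpa using h : (a.1 + c == t) = true)]
      exact ((by simp; omega : (a.1 == t - c) = true)).symm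
    · rw [(by simpa using h : (a.1 + c == t) = false)]
      exact ((by simp; omega : (a.1 == t - c) = false)).symm)]
  exact filter_sum_eq_getD prev (t - c) h
theorem mergeRow_nodup (c : Int) (prev cur : PySem.Dict Int Int) (h : cur.keys.Nodup) :
    (mergeRow c prev cur).keys.Nodup :=
  PySem.Dict.nodup_keys_foldl_insert_key prev.items (fun p => p.1 + c)
    (fun m p => m.getD (p.1 + c) 0 + p.2) cur h
theorem stepRows_length (c : Int) (rows : List (PySem.Dict Int Int)) :
    (stepRows c rows).length = rows.length := by
  cases rows with
  | nil => rfl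
  | cons r0 rest => simp [stepRows, List.length_zip]
theorem stepRows_getD_zero (c : Int) (rows : List (PySem.Dict Int Int)) :
    (stepRows c rows).getD 0 PySem.Dict.empty = rows.getD 0 PySem.Dict.empty := by
  cases rows with
  | nil => rfl
  | cons r0 rest => rfl
theorem stepRows_getD_succ (c : Int) (rows : List (PySem.Dict Int Int)) (k : Nat)
    (h : k + 1 < rows.length) :
    (stepRows c rows).getD (k + 1) PySem.Dict.empty
      = mergeRow c (rows.getD k PySem.Dict.empty) (rows.getD (k + 1) PySem.Dict.empty) := by
  cases rows with
  | nil => simp at h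
  | cons r0 rest =>
    have hk : k < rest.length := by simpa using h
    have hz : k < (List.zip (r0 :: rest) rest).length := by
      simp [List.length_zip]
      omega
    show (((r0 :: rest).zip rest).map (fun p => mergeRow c p.1 p.2)).getD k PySem.Dict.empty = _
    rw [List.getD_eq_getElem _ _ (by simpa using hz), List.getElem_map, List.getElem_zip,
      List.getD_eq_getElem _ _ (by simp; omega), List.getD_eq_getElem _ _ (by simp; omega)]
    rfl
def initRows (m : Nat) : List (PySem.Dict Int Int) :=
  (PySem.Dict.empty.insert 0 1) :: List.replicate m PySem.Dict.empty
theorem initRows_getD (m k : Nat) :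
    (initRows m).getD k PySem.Dict.empty
      = if k = 0 then PySem.Dict.empty.insert 0 1 else PySem.Dict.empty := by
  cases k with
  | zero => rfl
  | succ k =>
    simp only [initRows, List.getD_cons_succ, if_neg (Nat.succ_ne_zero k)]
    rcases Nat.lt_or_ge k m with h | h
    · rw [List.getD_eq_getElem _ _ (by simpa using h), List.getElem_replicate]
    · rw [List.getD_eq_default _ _ (by simpa using h)]
theorem rowsInv (m : Nat) (xs : List Int) :
    ((xs.foldl (fun rows c => stepRows c rows) (initRows m)).length = m + 1) ∧
      (∀ k, ((xs.foldl (fun rows c => stepRows c rows) (initRows m)).getD k PySem.Dict.empty).keys.Nodup) ∧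
      ∀ k s, ((xs.foldl (fun rows c => stepRows c rows) (initRows m)).getD k PySem.Dict.empty).getD s 0
        = if k ≤ m then (cnt k s xs : Int) else 0 := by
  induction xs using List.reverseRecOn with
  | nil =>
    refine ⟨by simp [initRows], fun k => ?_, fun k s => ?_⟩
    · rw [List.foldl_nil, initRows_getD]
      split_ifs
      · exact PySem.Dict.nodup_keys_insert _ _ _ PySem.Dict.nodup_keys_empty
      · exact PySem.Dict.nodup_keys_empty
    · rw [List.foldl_nil, initRows_getD]
      cases k with
      | zero =>
        rw [if_pos rfl, if_pos (Nat.zero_le m), cnt_zero, PySem.Dict.getD_insert]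
        split_ifs <;> simp_all
      | succ k =>
        rw [if_neg (Nat.succ_ne_zero k), PySem.Dict.getD_empty]
        split_ifs with h
        · rw [cnt_nil]
          simp
        · rfl
  | append_singleton ys c ih =>
    obtain ⟨ihlen, ihnd, ihval⟩ := ih
    rw [List.foldl_append, List.foldl_cons, List.foldl_nil]
    set rows := ys.foldl (fun rows c => stepRows c rows) (initRows m) with hrows
    refine ⟨by rw [stepRows_length, ihlen], fun k => ?_, fun k s => ?_⟩
    · rcases Nat.lt_or_ge k (m + 1) with hk | hk
      · cases k with
        | zero => rw [stepRows_getD_zero]; exact ihnd 0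
        | succ k =>
          rw [stepRows_getD_succ _ _ _ (by rw [ihlen]; exact hk)]
          exact mergeRow_nodup _ _ _ (ihnd (k + 1))
      · rw [List.getD_eq_default _ _ (by rw [stepRows_length, ihlen]; exact hk)]
        exact PySem.Dict.nodup_keys_empty
    · cases k with
      | zero =>
        rw [stepRows_getD_zero, ihval 0 s, if_pos (Nat.zero_le m), if_pos (Nat.zero_le m),
          cnt_zero, cnt_zero]
      | succ k =>
        rcases Nat.lt_or_ge (k + 1) (m + 1) with hk | hk
        · rw [stepRows_getD_succ _ _ _ (by rw [ihlen]; exact hk),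
            mergeRow_getD _ _ _ _ (ihnd k), ihval (k + 1) s, ihval k (s - c),
            if_pos (by omega), if_pos (by omega), if_pos (by omega), cnt_snoc_succ]
          push_cast
          ring
        · rw [List.getD_eq_default _ _ (by rw [stepRows_length, ihlen]; exact hk),
            PySem.Dict.getD_empty, if_neg (by omega)]
theorem find?_congr_mem {α} (l : List α) (p q : α → Bool) (h : ∀ a ∈ l, p a = q a) :
    l.find? p = l.find? q := by
  induction l with
  | nil => rfl
  | cons x t ih =>
    simp only [List.find?_cons]
    rw [h x (by simp)]
    cases q x
    · exact ih fun a ha => h a (by simp [ha])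
    · rfl
theorem part_2_eq_alt (containers : List Int) (req : Int) :
    part_2 containers req = part_2_alt containers req := by
  simp only [part_2, part_2_alt]
  rw [show part2Dict containers req = dictAux containers req (containers.length : Int) from rfl,
    show ((PySem.Dict.empty.insert 0 1) :: List.replicate containers.length PySem.Dict.empty)
      = initRows containers.length from rfl]
  set n := containers.length with hn
  set d := dictAux containers req (n : Int) with hd
  set rows := containers.foldl (fun rows c => stepRows c rows) (initRows n) with hrows
  obtain ⟨hk, hg⟩ := dictA_spec containers req n
  obtain ⟨hlen, hnd, hval⟩ := rowsInv n containers
  rw [← hrows] at hlen hnd hval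
  rw [← hd] at hk hg
  -- A side: sorted keys are the range itself
  have hsorted : PySem.List.sorted d.keys (fun x => x) false = PySem.List.pyRange 1 (n : Int) 1 := by
    rw [hk]
    exact PySem.List.sorted_eq_of_perm_of_pairwise_lt _ _ _ (List.Perm.refl _)
      (PySem.List.pairwise_lt_pyRange_one 1 (n : Int))
  have hNat : ((n : Int) - 1).toNat = n - 1 := by omega
  have hrange : PySem.List.pyRange 1 (n : Int) 1
      = (List.range (n - 1)).map (fun k : Nat => (1 : Int) + (k : Int)) := by
    rw [PySem.List.pyRange_one]
    norm_num [hNat]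
  -- B side: the slice is rows[1], …, rows[n-1]
  have hslice : PySem.List.slice rows (some (1 : Int)) (some (n : Int))
      = (List.range (n - 1)).map (fun k => rows.getD (1 + k) PySem.Dict.empty) := by
    rw [PySem.List.slice_toNat rows (by omega) (by omega)]
    have h2 : ((n : Int)).toNat = n := by omega
    rw [show Int.toNat 1 = 1 from rfl, h2]
    apply List.ext_getElem
    · simp only [List.length_take, List.length_drop, List.length_map, List.length_range, hlen]
      omega
    · intro i hi1 hi2
      have hi : i < n - 1 := by simpa using hi2
      have hin : 1 + i < rows.length := by rw [hlen]; omega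
      rw [List.getElem_take, List.getElem_drop, List.getElem_map, List.getElem_range,
        List.getD_eq_getElem _ _ hin]
  rw [hsorted, hrange, hslice, List.find?_map, List.find?_map]
  have hpred : ∀ k ∈ List.range (n - 1),
      ((fun i => decide (0 < d.getD i 0)) ∘ fun k : Nat => (1 : Int) + (k : Int)) k
        = ((fun row : PySem.Dict Int Int => decide (0 < row.getD req 0))
            ∘ fun k => rows.getD (1 + k) PySem.Dict.empty) k := by
    intro k hkmem
    have hklt : k < n - 1 := List.mem_range.mp hkmem
    have hA : d.getD ((1 : Int) + (k : Int)) 0 = (cnt (1 + k) req containers : Int) := by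
      rw [hg, if_pos (by constructor <;> [omega; omega])]
      rw [show ((1 : Int) + (k : Int)).toNat = 1 + k from by omega]
    have hB : (rows.getD (1 + k) PySem.Dict.empty).getD req 0 = (cnt (1 + k) req containers : Int) := by
      rw [hval, if_pos (by omega)]
    simp only [Function.comp, hA, hB]
  rw [find?_congr_mem _ _ _ hpred]
  cases hfind : (List.range (n - 1)).find?
      ((fun row : PySem.Dict Int Int => decide (0 < row.getD req 0))
        ∘ fun k => rows.getD (1 + k) PySem.Dict.empty) with
  | none => rfl
  | some k =>
    simp only [Option.map_some]
    have hkmem := List.mem_range.mp (List.mem_of_find?_eq_some hfind)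
    have hA : d.getD ((1 : Int) + (k : Int)) 0 = (cnt (1 + k) req containers : Int) := by
      rw [hg, if_pos (by constructor <;> [omega; omega])]
      rw [show ((1 : Int) + (k : Int)).toNat = 1 + k from by omega]
    have hB : (rows.getD (1 + k) PySem.Dict.empty).getD req 0 = (cnt (1 + k) req containers : Int) := by
      rw [hval, if_pos (by omega)]
    rw [hA, hB]

-- ===== VERDICT (by name: the statement is the Claim_ definition above) =====
theorem part_2_spec : Claim_equal_part_2 := by
  intro containers req_liters _
  show part_2 containers req_liters = part_2_alt containers req_liters
  exact part_2_eq_alt containers req_liters
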